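-- pv_equiv track=rewrite | github.com/LaurenceYamamoto/contests | library/python/文字列/文字の置換と区間文字列.py | count_substrings_after_swap
-- ===== SOURCE A (Python) =====
-- def count_substrings_after_swap(S: list[str], T: list[str], count: int, x: int, c: str) -> int:
--     """
--     x番目の文字をcに変更したときの、部分文字列で、文字列Tと一致するものの個数を数える
--
--     Args:
--         S (list[str]): 検索対象の文字列（文字のリスト）
--         T (list[str]): 検索する部分文字列（文字のリスト）
--         count (int): 変更前の部分文字列で、文字列Tと一致するものの個数
--         X (int): 変更する文字の位置（最初の文字の位置は0である）
--         c (str): 変更後の文字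
--
--     Returns:
--         int: 変更後の部分文字列で、文字列Tと一致するものの個数
--
--     計算量: s=len(S), t=len(T)として
--     - O(s*t)
--     """
--     def check(S:list[str], T:list[str]) -> bool:
--         for i in range(len(T)):
--             if S[x] == T[i]:
--                 start = x - i
--                 end = start + len(T)
--                 if start < 0 or end > len(S):
--                     continue
--                 elif S[start:end] == T:
--                     return True
--         return False
--     # 変更前の文字列のチェック
--     if check(S, T):
--       count -= 1
--     # 変更後の文字列のチェック
--     S[x] = c
--     if check(S, T):
--       count += 1
--     return count
-- ===== SOURCE B (Python) =====
-- def count_substrings_after_swap(S: list[str], T: list[str], count: int, x: int, c: str) -> int: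
--     # Bitap (Shift-And) bit-parallel matcher over the window of positions that an
--     # occurrence of T covering position x could touch.
--     t = len(T)
--     n = len(S)
--     if t == 0:
--         S[x] = c
--         return count
--     masks = {}
--     for j, ch in enumerate(T):
--         masks[ch] = masks.get(ch, 0) | (1 << j)
--     goal = 1 << (t - 1)
--     lo = max(0, x - t + 1)
--     hi = min(n, x + t)
--
--     def hit(sub: str) -> bool:
--         # D's bit k is set iff the last k+1 scanned symbols equal T[:k+1]
--         D = 0
--         for p in range(lo, hi):
--             sym = sub if p == x else S[p]
--             D = ((D << 1) | 1) & masks.get(sym, 0)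
--             if D & goal:
--                 return True
--         return False
--
--     if hit(S[x]):
--         count -= 1
--     S[x] = c
--     if hit(c):
--         count += 1
--     return count
-- ===== Notes on version B (the rewrite author's own statement) =====
-- stated objective: alternative
-- what changed: B replaces A's per-alignment slice comparisons by the Bitap (Shift-And) bit-parallel matcher: it precomputes a character-to-bitmask dictionary from T, then makes one left-to-right pass over the window of positions an occurrence covering x could touch, maintaining a single integer whose bit k records 'the last k+1 symbols match T[:k+1]' and reporting a hit when bit len(T)-1 appears.
import Mathlib
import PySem

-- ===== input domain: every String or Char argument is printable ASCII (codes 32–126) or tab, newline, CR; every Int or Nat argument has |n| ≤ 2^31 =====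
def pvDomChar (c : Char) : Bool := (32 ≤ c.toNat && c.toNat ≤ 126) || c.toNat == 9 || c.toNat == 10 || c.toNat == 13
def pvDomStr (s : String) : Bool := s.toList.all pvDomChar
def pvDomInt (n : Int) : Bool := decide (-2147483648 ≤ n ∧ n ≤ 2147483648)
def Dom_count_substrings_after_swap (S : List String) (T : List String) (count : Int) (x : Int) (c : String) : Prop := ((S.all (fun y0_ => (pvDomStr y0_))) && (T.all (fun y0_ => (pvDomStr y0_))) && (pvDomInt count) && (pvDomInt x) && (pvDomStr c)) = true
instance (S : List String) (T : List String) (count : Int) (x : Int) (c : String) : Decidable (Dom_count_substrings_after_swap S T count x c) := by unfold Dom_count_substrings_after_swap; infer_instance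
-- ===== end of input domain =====

-- B recomputes the occurrence test with the Bitap (Shift-And) bit-parallel matcher: a
-- character→bitmask dictionary built from T once, then a single pass over the window with one
-- shift/or/and per symbol, instead of A's scan over pattern indices with per-candidate slice
-- copies (objective: alternative). Both A and B mutate S in place (S[x] = c); the equivalence
-- proved here is about the return value.

-- ===== PORT A =====
-- A's inner helper `check`: for i in range(len(T)): if S[x] == T[i] then test the
-- occurrence starting at x - i (skip if out of bounds); early `return True` = any.
-- pyGetD is used with default "" : inside Pre_ the index x is in range, and i, x - i are
-- in range at every use, so the default is never read.
def pvCheckA (S T : List String) (x : Int) : Bool :=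
  (List.range T.length).any (fun i =>
    if PySem.List.pyGetD S x "" == PySem.List.pyGetD T (i : Int) "" then
      if x - (i : Int) < 0 ∨ x - (i : Int) + (T.length : Int) > (S.length : Int) then false
      else PySem.List.slice S (some (x - (i : Int))) (some (x - (i : Int) + (T.length : Int))) == T
    else false)

def count_substrings_after_swap (S : List String) (T : List String) (count : Int) (x : Int) (c : String) : Int :=
  let count1 := if pvCheckA S T x then count - 1 else count
  let S2 := PySem.List.pySetD S x c   -- S[x] = c
  if pvCheckA S2 T x then count1 + 1 else count1

-- ===== PORT B =====
-- masks[ch] |= 1 << j for j, ch in enumerate(T)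
def pvMasks (T : List String) : PySem.Dict String Nat :=
  (PySem.List.enumerate T 0).foldl
    (fun m jc => m.insert jc.2 ((m.getD jc.2 0) ||| (1 <<< jc.1.toNat))) PySem.Dict.empty

-- sym = sub if p == x else S[p]
def pvSym (S : List String) (x : Int) (sub : String) (p : Int) : String :=
  if p = x then sub else PySem.List.pyGetD S p ""

-- the `for p in range(lo, hi)` loop of Source B's `hit`, with its early `return True`
def pvHitLoop (S : List String) (x : Int) (sub : String) (masks : PySem.Dict String Nat)
    (goal : Nat) : List Int → Nat → Bool
  | [], _ => false
  | p :: ps, D =>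
      let D' := ((D <<< 1) ||| 1) &&& masks.getD (pvSym S x sub p) 0
      if D' &&& goal ≠ 0 then true else pvHitLoop S x sub masks goal ps D'

-- Source B's `hit(sub)` (lo = max(0, x-t+1), hi = min(n, x+t), goal = 1 << (t-1))
def pvHitB (S T : List String) (x : Int) (sub : String) : Bool :=
  pvHitLoop S x sub (pvMasks T) (1 <<< (T.length - 1))
    (PySem.List.pyRange (max 0 (x - (T.length : Int) + 1))
      (min (S.length : Int) (x + (T.length : Int))) 1) 0

def count_substrings_after_swap_alt (S : List String) (T : List String) (count : Int) (x : Int) (c : String) : Int :=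
  if T.length = 0 then count
  else
    let count1 := if pvHitB S T x (PySem.List.pyGetD S x "") then count - 1 else count
    let S2 := PySem.List.pySetD S x c   -- S[x] = c
    if pvHitB S2 T x c then count1 + 1 else count1

-- ===== PRECONDITION & SPEC =====
-- A evaluates S[x] (and assigns S[x] = c): it raises IndexError iff x is out of range.
def Pre_count_substrings_after_swap (S : List String) (T : List String) (count : Int) (x : Int) (c : String) : Prop :=
  PySem.Raise.InRange S.length x
instance (S : List String) (T : List String) (count : Int) (x : Int) (c : String) : Decidable (Pre_count_substrings_after_swap S T count x c) := by unfold Pre_count_substrings_after_swap; infer_instance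

def pvWitness_count_substrings_after_swap : List String × List String × Int × Int × String :=
  (["a", "b", "a"], ["a", "b"], 1, 2, "b")

def Spec_count_substrings_after_swap (S : List String) (T : List String) (count : Int) (x : Int) (c : String) (out : Int) : Prop := out = count_substrings_after_swap_alt S T count x c
instance (S : List String) (T : List String) (count : Int) (x : Int) (c : String) (out : Int) : Decidable (Spec_count_substrings_after_swap S T count x c out) := by unfold Spec_count_substrings_after_swap; infer_instance

-- ===== CLAIM (what is proved, stated in full; the proofs are below) =====
def Claim_equal_count_substrings_after_swap : Prop := ∀ (S : List String) (T : List String) (count : Int) (x : Int) (c : String), Dom_count_substrings_after_swap S T count x c → Pre_count_substrings_after_swap S T count x c → Spec_count_substrings_after_swap S T count x c (count_substrings_after_swap S T count x c)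

-- ===== LEMMAS AND PROOFS =====

-- For x < 0 every candidate start x - i is negative, so A's check is false.
lemma pvCheckA_neg (S T : List String) (x : Int) (hx : x < 0) : pvCheckA S T x = false := by
  unfold pvCheckA
  rw [List.any_eq_false]
  intro i hi
  have h1 : x - (i : Int) < 0 := by omega
  simp [h1]

-- drop/take window equality is pointwise equality on the window.
lemma window_eq_iff (L T : List String) (a : Nat) (h : a + T.length ≤ L.length) :
    ((L.drop a).take T.length = T) ↔ ∀ j, (hj : j < T.length) →
      L[a + j]'(by omega) = T[j]'hj := by
  constructor
  · intro he j hj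
    have hj' : j < ((L.drop a).take T.length).length := by
      simp [List.length_take, List.length_drop]; omega
    have := List.getElem_of_eq he hj'
    simp only [List.getElem_take, List.getElem_drop] at this
    exact this
  · intro hp
    apply List.ext_getElem
    · simp [List.length_take, List.length_drop]; omega
    · intro i h1 h2
      have hi : i < T.length := h2
      simp only [List.getElem_take, List.getElem_drop]
      exact hp i hi

-- A's check is an existential over pattern indices.
lemma pvCheckA_true_iff (S' T : List String) (x : Int) :
    pvCheckA S' T x = true ↔ ∃ i : Nat, i < T.length ∧
      PySem.List.pyGetD S' x "" = PySem.List.pyGetD T (i : Int) "" ∧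
      0 ≤ x - (i : Int) ∧ x - (i : Int) + (T.length : Int) ≤ (S'.length : Int) ∧
      PySem.List.slice S' (some (x - (i : Int))) (some (x - (i : Int) + (T.length : Int))) = T := by
  unfold pvCheckA
  rw [List.any_eq_true]
  constructor
  · rintro ⟨i, hi, hp⟩
    rw [List.mem_range] at hi
    split_ifs at hp with h1 h2
    exact ⟨i, hi, by simpa using h1, by omega, by omega, by simpa using hp⟩
  · rintro ⟨i, hi, h1, h2, h3, h4⟩
    refine ⟨i, List.mem_range.mpr hi, ?_⟩
    rw [if_pos (by simpa using h1), if_neg (by omega)]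
    simpa using h4

-- bit k of the mask dictionary's value for ch says: T[k] = ch.
lemma pvMasks_fold_testBit (l : List (Int × String)) (d : PySem.Dict String Nat)
    (ch : String) (k : Nat) (hpos : ∀ p ∈ l, 0 ≤ p.1) :
    (((l.foldl (fun m jc => m.insert jc.2 ((m.getD jc.2 0) ||| (1 <<< jc.1.toNat)))
       d).getD ch 0).testBit k = true)
      ↔ ((d.getD ch 0).testBit k = true ∨ ((k : Int), ch) ∈ l) := by
  induction l generalizing d with
  | nil => simp
  | cons jc rest ih =>
    rcases jc with ⟨j, c0⟩
    have hj0 : 0 ≤ j := hpos (j, c0) (List.mem_cons_self ..)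
    rw [List.foldl_cons, ih _ (fun p hp => hpos p (List.mem_cons_of_mem _ hp)),
      PySem.Dict.getD_insert, List.mem_cons]
    by_cases hc : ch = c0
    · subst hc
      rw [if_pos rfl, Nat.testBit_or, Nat.one_shiftLeft, Nat.testBit_two_pow]
      simp only [Bool.or_eq_true, decide_eq_true_eq, Prod.mk.injEq]
      constructor
      · rintro (⟨h | h⟩ | h)
        · exact Or.inl h
        · exact Or.inr (Or.inl ⟨by omega, trivial⟩)
        · exact Or.inr (Or.inr h)
      · rintro (h | ⟨⟨h1, _⟩ | h⟩)
        · exact Or.inl (Or.inl h)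
        · exact Or.inl (Or.inr (by omega))
        · exact Or.inr h
    · rw [if_neg hc]
      constructor
      · rintro (h | h)
        · exact Or.inl h
        · exact Or.inr (Or.inr h)
      · rintro (h | ⟨h | h⟩)
        · exact Or.inl h
        · exact absurd (congrArg Prod.snd h) hc
        · exact Or.inr h

lemma pvMasks_testBit (T : List String) (ch : String) (k : Nat) :
    (((pvMasks T).getD ch 0).testBit k = true)
      ↔ (k < T.length ∧ PySem.List.pyGetD T (k : Int) "" = ch) := by
  unfold pvMasks
  rw [pvMasks_fold_testBit _ _ _ _ (fun p hp => by
    rcases (PySem.List.mem_enumerate_iff _ _ _).mp hp with ⟨m, hm, he⟩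
    rw [he]; simp)]
  have hz : (PySem.Dict.empty : PySem.Dict String Nat).getD ch 0 = 0 := by
    simp [PySem.Dict.empty, PySem.Dict.getD, PySem.Dict.get?]
  rw [hz, PySem.List.mem_enumerate_iff]
  simp only [Nat.zero_testBit, Bool.false_eq_true, false_or]
  constructor
  · rintro ⟨m, hm, he⟩
    have hk : k = m := by
      have := congrArg Prod.fst he; simp at this; omega
    subst hk
    have hsnd : ch = T[k] := congrArg Prod.snd he
    refine ⟨hm, ?_⟩
    rw [PySem.List.pyGetD_natCast, List.getD_eq_getElem _ _ hm, ← hsnd]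
  · rintro ⟨hk, he⟩
    refine ⟨k, hk, ?_⟩
    rw [PySem.List.pyGetD_natCast, List.getD_eq_getElem _ _ hk] at he
    rw [← he]
    simp

-- n &&& 2^i ≠ 0 exactly when bit i of n is set.
lemma and_two_pow_ne_zero (n i : Nat) : (n &&& (1 <<< i) ≠ 0) ↔ n.testBit i = true := by
  rw [Nat.one_shiftLeft, Nat.and_two_pow]
  cases hb : n.testBit i <;> simp

-- the loop invariant: bit k of D says the k+1 symbols ending just before position a match T[:k+1]
def pvDinv (S T : List String) (x : Int) (sub : String) (lo a : Int) (D : Nat) : Prop :=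
  ∀ k : Nat, (D.testBit k = true ↔ (k < T.length ∧ lo ≤ a - 1 - k ∧
    ∀ j : Nat, j ≤ k → pvSym S x sub (a - 1 - k + j) = PySem.List.pyGetD T (j : Int) ""))

lemma pvDinv_step (S T : List String) (x : Int) (sub : String) (lo a : Int) (D : Nat)
    (hla : lo ≤ a) (hD : pvDinv S T x sub lo a D) :
    pvDinv S T x sub lo (a + 1)
      (((D <<< 1) ||| 1) &&& (pvMasks T).getD (pvSym S x sub a) 0) := by
  have h1 : ∀ i : Nat, Nat.testBit 1 i = decide (0 = i) := fun i => by
    rw [← pow_zero 2, Nat.testBit_two_pow]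
  intro k
  rw [Nat.testBit_and, Bool.and_eq_true, Nat.testBit_or, Bool.or_eq_true,
    Nat.testBit_shiftLeft, pvMasks_testBit]
  cases k with
  | zero =>
    constructor
    · rintro ⟨_, hk, hm⟩
      refine ⟨hk, by omega, fun j hj => ?_⟩
      interval_cases j
      simpa using hm.symm
    · rintro ⟨hk, _, hall⟩
      refine ⟨Or.inr (by simp [h1]), hk, ?_⟩
      have := hall 0 (le_refl 0)
      simpa using this.symm
  | succ k' =>
    constructor
    · rintro ⟨hsh, hk, hm⟩
      rcases hsh with hsh | hsh
      · have hb : D.testBit k' = true := by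
          simpa using hsh
        rcases (hD k').mp hb with ⟨_, hlo, hall⟩
        refine ⟨hk, by omega, fun j hj => ?_⟩
        rcases Nat.lt_or_ge j (k' + 1) with hj' | hj'
        · have := hall j (by omega)
          have he : a + 1 - 1 - (k' + 1 : Nat) + j = a - 1 - k' + j := by push_cast; ring
          rw [he]; exact this
        · have hjk : j = k' + 1 := by omega
          subst hjk
          have he : a + 1 - 1 - ((k' + 1 : Nat) : Int) + ((k' + 1 : Nat) : Int) = a := by ring
          rw [he]; exact hm.symm
      · simp [h1] at hsh
    · rintro ⟨hk, hlo, hall⟩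
      refine ⟨Or.inl ?_, hk, ?_⟩
      · have hb : D.testBit k' = true := by
          rw [hD k']
          refine ⟨by omega, by push_cast at hlo ⊢; omega, fun j hj => ?_⟩
          have := hall j (by omega)
          have he : a + 1 - 1 - (k' + 1 : Nat) + j = a - 1 - k' + j := by push_cast; ring
          rw [he] at this; exact this
        simpa using hb
      · have := hall (k' + 1) (le_refl _)
        have he : a + 1 - 1 - ((k' + 1 : Nat) : Int) + ((k' + 1 : Nat) : Int) = a := by ring
        rw [he] at this; exact this.symm

-- what a hit at end position e means
def pvFullAt (S T : List String) (x : Int) (sub : String) (lo e : Int) : Prop :=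
  lo ≤ e - (T.length - 1 : Nat) ∧
    ∀ j : Nat, j ≤ T.length - 1 →
      pvSym S x sub (e - (T.length - 1 : Nat) + j) = PySem.List.pyGetD T (j : Int) ""

lemma pvHitLoop_iff (S T : List String) (x : Int) (sub : String) (lo hi : Int)
    (ht : 1 ≤ T.length) :
    ∀ (a : Int) (D : Nat), lo ≤ a → pvDinv S T x sub lo a D →
      (pvHitLoop S x sub (pvMasks T) (1 <<< (T.length - 1)) (PySem.List.pyRange a hi 1) D = true
        ↔ ∃ e : Int, a ≤ e ∧ e < hi ∧ pvFullAt S T x sub lo e) := by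
  intro a D
  induction hn : (hi - a).toNat generalizing a D with
  | zero =>
    intro hla _
    rw [PySem.List.pyRange_one_eq_nil (by omega)]
    simp only [pvHitLoop]
    constructor
    · intro h; exact absurd h (by simp)
    · rintro ⟨e, h1, h2, _⟩; omega
  | succ m ih =>
    intro hla hD
    have hab : a < hi := by omega
    rw [PySem.List.pyRange_one_cons hab]
    simp only [pvHitLoop]
    have hstep := pvDinv_step S T x sub lo a D hla hD
    set D' := ((D <<< 1) ||| 1) &&& (pvMasks T).getD (pvSym S x sub a) 0 with hD'
    have hfull : (D'.testBit (T.length - 1) = true) ↔ pvFullAt S T x sub lo a := by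
      rw [hstep (T.length - 1)]
      unfold pvFullAt
      constructor
      · rintro ⟨_, h2, h3⟩
        exact ⟨by omega, fun j hj => by
          have := h3 j hj
          have he : a - (T.length - 1 : Nat) + j = a + 1 - 1 - (T.length - 1 : Nat) + j := by ring
          rw [he]; exact this⟩
      · rintro ⟨h2, h3⟩
        exact ⟨by omega, by omega, fun j hj => by
          have := h3 j hj
          have he : a - (T.length - 1 : Nat) + j = a + 1 - 1 - (T.length - 1 : Nat) + j := by ring
          rw [he] at this; exact this⟩
    by_cases hbit : D'.testBit (T.length - 1) = true
    · rw [if_pos ((and_two_pow_ne_zero _ _).mpr hbit)]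
      exact ⟨fun _ => ⟨a, le_refl a, hab, hfull.mp hbit⟩, fun _ => rfl⟩
    · rw [if_neg (fun hcon => hbit ((and_two_pow_ne_zero _ _).mp hcon))]
      rw [ih (a + 1) D' (by omega) (by omega) hstep]
      constructor
      · rintro ⟨e, h1, h2, h3⟩; exact ⟨e, by omega, h2, h3⟩
      · rintro ⟨e, h1, h2, h3⟩
        refine ⟨e, ?_, h2, h3⟩
        rcases eq_or_lt_of_le h1 with he | he
        · exact absurd (hfull.mpr (he ▸ h3)) hbit
        · omega

-- B's hit is the same existential over candidate starts as A's check reaches.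
lemma pvHitB_true_iff (S T : List String) (x : Int) (ch : String) (ht : 1 ≤ T.length) :
    pvHitB S T x ch = true ↔ ∃ s : Int,
      max 0 (x - (T.length : Int) + 1) ≤ s ∧ s ≤ min x ((S.length : Int) - (T.length : Int)) ∧
      ch = PySem.List.pyGetD T (x - s) "" ∧
      ∀ j : Nat, j < T.length → (s + (j : Int) = x ∨
        PySem.List.pyGetD S (s + (j : Int)) "" = PySem.List.pyGetD T (j : Int) "") := by
  unfold pvHitB
  set lo : Int := max 0 (x - (T.length : Int) + 1) with hlo
  set hi : Int := min (S.length : Int) (x + (T.length : Int)) with hhi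
  have h0 : pvDinv S T x ch lo lo 0 := by
    intro k
    simp only [Nat.zero_testBit]
    constructor
    · intro h; exact absurd h (by simp)
    · rintro ⟨_, h2, _⟩; omega
  rw [pvHitLoop_iff S T x ch lo hi ht lo 0 (le_refl lo) h0]
  have htc : ((T.length - 1 : Nat) : Int) = (T.length : Int) - 1 := by omega
  constructor
  · rintro ⟨e, h1, h2, hfull⟩
    have h3 : lo ≤ e - ((T.length - 1 : Nat) : Int) := hfull.1
    have h4 := hfull.2
    rw [htc] at h3
    set s : Int := e - (T.length : Int) + 1 with hs
    have hsx : s ≤ x := by omega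
    have hxe : x ≤ e := by omega
    refine ⟨s, by omega, by omega, ?_, ?_⟩
    · have hj0 : (x - s).toNat ≤ T.length - 1 := by omega
      have := h4 (x - s).toNat hj0
      have he1 : e - ((T.length - 1 : Nat) : Int) + ((x - s).toNat : Int) = x := by
        rw [htc]; omega
      rw [he1] at this
      unfold pvSym at this
      rw [if_pos rfl] at this
      rw [this]
      congr 1
      omega
    · intro j hj
      have := h4 j (by omega)
      have he2 : e - ((T.length - 1 : Nat) : Int) + (j : Int) = s + j := by
        rw [htc]; omega
      rw [he2] at this
      unfold pvSym at this
      by_cases hjx : s + (j : Int) = x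
      · exact Or.inl hjx
      · rw [if_neg hjx] at this
        exact Or.inr this
  · rintro ⟨s, h1, h2, hch, hall⟩
    refine ⟨s + (T.length : Int) - 1, by omega, by omega, ?_, ?_⟩
    · rw [htc]; omega
    · intro j hj
      have he3 : s + (T.length : Int) - 1 - ((T.length - 1 : Nat) : Int) + (j : Int) = s + j := by
        rw [htc]; omega
      rw [he3]
      unfold pvSym
      by_cases hjx : s + (j : Int) = x
      · rw [if_pos hjx, hch]
        congr 1
        omega
      · rw [if_neg hjx]
        rcases hall j (by omega) with h | h
        · exact absurd h hjx
        · exact h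

-- The central equivalence: for 0 ≤ x < |S|, A's check on a list S' that has ch at
-- position x and agrees with S elsewhere equals B's bitap hit on S with character ch.
lemma check_eq_hit (S' S T : List String) (x : Nat) (ch : String) (ht : 1 ≤ T.length)
    (hx : x < S.length) (hlen : S'.length = S.length)
    (hxv : S'[x]? = some ch)
    (hag : ∀ p : Nat, p < S.length → p ≠ x → S'[p]? = S[p]?) :
    pvCheckA S' T (x : Int) = pvHitB S T (x : Int) ch := by
  have hlenS' : S'.length = S.length := hlen
  have hxv' : PySem.List.pyGetD S' (x : Int) "" = ch := by
    rw [PySem.List.pyGetD_natCast, List.getD_eq_getElem?_getD, hxv]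
    rfl
  apply Bool.coe_iff_coe.mp
  rw [pvCheckA_true_iff, pvHitB_true_iff S T _ ch ht]
  constructor
  · rintro ⟨i, hi, hguard, h0, hub, hslice⟩
    have hix : i ≤ x := by omega
    have hub' : (x - i) + T.length ≤ S.length := by omega
    refine ⟨(x : Int) - i, by omega, ?_, ?_, ?_⟩
    · push_cast [hlenS'] at hub ⊢; omega
    · have he : (x : Int) - ((x : Int) - i) = i := by ring
      rw [he, ← hguard, hxv']
    · intro j hj
      have hcast1 : (x : Int) - i = ((x - i : Nat) : Int) := by omega
      rw [hcast1, PySem.List.slice_natCast_add] at hslice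
      have hwin := (window_eq_iff S' T (x - i) (by omega)).mp hslice
      by_cases hjx : (x : Int) - i + j = x
      · exact Or.inl hjx
      · refine Or.inr ?_
        have hne : (x - i) + j ≠ x := by omega
        have hlt : (x - i) + j < S.length := by omega
        have h1 := hag ((x - i) + j) hlt hne
        have h2 := hwin j hj
        have hcast3 : (x : Int) - i + j = (((x - i) + j : Nat) : Int) := by push_cast; omega
        rw [hcast3, PySem.List.pyGetD_natCast, PySem.List.pyGetD_natCast,
          List.getD_eq_getElem?_getD, List.getD_eq_getElem?_getD, ← h1,
          List.getElem?_eq_getElem (by omega : (x - i) + j < S'.length),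
          List.getElem?_eq_getElem hj]
        simp [h2]
  · rintro ⟨s, hlo, hhi, hch, hall⟩
    have hs0 : 0 ≤ s := le_trans (le_max_left _ _) hlo
    have hsx : s ≤ (x : Int) := le_trans hhi (min_le_left _ _)
    have hst : s + T.length ≤ S.length := by
      have := le_trans hhi (min_le_right _ _); omega
    have hit : (x : Int) - s < T.length := by
      have := le_trans (le_max_right _ _) hlo; omega
    have hlenZ : ((S'.length : Int)) = (S.length : Int) := by exact_mod_cast hlenS'
    refine ⟨((x : Int) - s).toNat, by omega, ?_, by omega, by omega, ?_⟩
    · rw [show ((((x : Int) - s).toNat : Nat) : Int) = (x : Int) - s from by omega, hxv']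
      exact hch
    · have hcast1 : (x : Int) - (((x : Int) - s).toNat : Int) = ((s.toNat : Nat) : Int) := by omega
      rw [hcast1, PySem.List.slice_natCast_add]
      refine (window_eq_iff S' T s.toNat (by omega)).mpr ?_
      intro j hj
      by_cases hjx : s + (j : Int) = x
      · have hsx' : s.toNat + j = x := by omega
        have h0 : S'[s.toNat + j]? = some ch := by rw [hsx']; exact hxv
        rw [List.getElem?_eq_getElem (by omega : s.toNat + j < S'.length)] at h0
        rw [Option.some.inj h0]
        have hjc : ((x : Int) - s) = (j : Int) := by omega
        rw [hjc, PySem.List.pyGetD_natCast, List.getD_eq_getElem?_getD,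
          List.getElem?_eq_getElem hj] at hch
        exact hch
      · rcases hall j hj with h | h
        · exact absurd h hjx
        · have hne : s.toNat + j ≠ x := by omega
          have hlt : s.toNat + j < S.length := by omega
          have h1 := hag (s.toNat + j) hlt hne
          have hcast3 : s + (j : Int) = ((s.toNat + j : Nat) : Int) := by push_cast; omega
          rw [hcast3, PySem.List.pyGetD_natCast, PySem.List.pyGetD_natCast,
            List.getD_eq_getElem?_getD, List.getD_eq_getElem?_getD,
            List.getElem?_eq_getElem (by omega : s.toNat + j < S.length),
            List.getElem?_eq_getElem hj] at h
          have h2 : S[s.toNat + j]'(by omega) = T[j]'hj := by simpa using h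
          have h3 := h1.trans (List.getElem?_eq_getElem (by omega : s.toNat + j < S.length))
          rw [List.getElem?_eq_getElem (by omega : s.toNat + j < S'.length)] at h3
          rw [Option.some.inj h3, h2]

-- for x < 0 there is no candidate start, so B's hit is false too
lemma pvHitB_neg (S T : List String) (x : Int) (ch : String) (ht : 1 ≤ T.length)
    (hx : x < 0) : pvHitB S T x ch = false := by
  rw [Bool.eq_false_iff]
  intro hcon
  rcases (pvHitB_true_iff S T x ch ht).mp hcon with ⟨s, h1, h2, _, _⟩
  have := le_trans (le_max_left _ _) h1
  have := le_trans h2 (min_le_left _ _)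
  omega

-- A's check with empty T is false
lemma pvCheckA_nil (S T : List String) (x : Int) (ht : T.length = 0) :
    pvCheckA S T x = false := by
  unfold pvCheckA
  rw [ht]
  rfl

-- ===== VERDICT (by name: the statement is the Claim_ definition above) =====
theorem count_substrings_after_swap_spec : Claim_equal_count_substrings_after_swap := by
  intro S T count x c _ hpre
  unfold Pre_count_substrings_after_swap PySem.Raise.InRange at hpre
  unfold Spec_count_substrings_after_swap count_substrings_after_swap count_substrings_after_swap_alt
  by_cases ht : T.length = 0
  · rw [if_pos ht]
    simp only [pvCheckA_nil S T x ht, pvCheckA_nil _ T x ht, if_neg (Bool.false_ne_true)]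
  · rw [if_neg ht]
    have ht1 : 1 ≤ T.length := by omega
    by_cases hx : 0 ≤ x
    · have hxn : x.toNat < S.length := by omega
      have hxe : x = ((x.toNat : Nat) : Int) := by omega
      rw [hxe]
      have hb : pvCheckA S T ((x.toNat : Nat) : Int)
          = pvHitB S T ((x.toNat : Nat) : Int) (PySem.List.pyGetD S ((x.toNat : Nat) : Int) "") := by
        apply check_eq_hit S S T x.toNat _ ht1 hxn rfl ?_ (fun p _ _ => rfl)
        rw [PySem.List.pyGetD_natCast, List.getD_eq_getElem _ _ hxn,
          List.getElem?_eq_getElem hxn]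
      have ha : pvCheckA (PySem.List.pySetD S ((x.toNat : Nat) : Int) c) T ((x.toNat : Nat) : Int)
          = pvHitB (PySem.List.pySetD S ((x.toNat : Nat) : Int) c) T ((x.toNat : Nat) : Int) c := by
        rw [PySem.List.pySetD_natCast]
        apply check_eq_hit (S.set x.toNat c) (S.set x.toNat c) T x.toNat c ht1
          (by simpa using hxn) rfl ?_ (fun p _ _ => rfl)
        exact List.getElem?_set_self (by simpa using hxn)
      simp only [hb, ha]
    · simp only [pvCheckA_neg S T x (by omega),
        pvCheckA_neg (PySem.List.pySetD S x c) T x (by omega),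
        pvHitB_neg S T x (PySem.List.pyGetD S x "") ht1 (by omega),
        pvHitB_neg (PySem.List.pySetD S x c) T x c ht1 (by omega),
        if_neg (Bool.false_ne_true)]
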